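-- pv_equiv track=rewrite | github.com/TDTU-K25/linear-algebra | Lab06/lab6.py | norm_1
-- ===== SOURCE A (Python) =====
-- def norm_1(a):
--   arrayOfSumOfElementsInColumn = []
--   for j in range(0, len(a[0])):
--     sum = 0
--     for i in range(0, len(a)):
--       sum += abs(a[i][j])
--       arrayOfSumOfElementsInColumn.append(sum)
--
--   max = arrayOfSumOfElementsInColumn[0]
--   for item in arrayOfSumOfElementsInColumn:
--     if (item > max):
--       max = item
--   return max
-- ===== SOURCE B (Python) =====
-- def norm_1(a):
--   totals = [0] * len(a[0])
--   for row in a: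
--     totals = [t + abs(x) for t, x in zip(totals, row)]
--   return max(totals)
-- ===== Notes on version B (the rewrite author's own statement) =====
-- stated objective: alternative
-- what changed: B traverses the matrix row-major in a single pass, maintaining one running vector of column totals updated per row via zip, then takes max(); A traverses column-major with a nested index loop, records every running prefix sum in one flat list (m*n appends) and hand-rolls the maximum over all m*n prefix sums.
import Mathlib
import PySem

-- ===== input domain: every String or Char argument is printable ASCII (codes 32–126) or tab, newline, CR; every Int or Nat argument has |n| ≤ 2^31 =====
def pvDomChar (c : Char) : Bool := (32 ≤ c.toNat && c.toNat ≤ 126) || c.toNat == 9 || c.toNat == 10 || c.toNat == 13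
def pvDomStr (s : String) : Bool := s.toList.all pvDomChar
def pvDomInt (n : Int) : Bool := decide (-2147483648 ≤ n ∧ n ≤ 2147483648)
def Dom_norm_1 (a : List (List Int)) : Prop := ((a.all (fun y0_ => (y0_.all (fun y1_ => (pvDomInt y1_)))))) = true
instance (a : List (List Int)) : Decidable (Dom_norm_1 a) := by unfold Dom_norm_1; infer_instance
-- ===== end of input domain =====

-- B replaces A's column-major nested loop (which stores every running prefix sum in one
-- flat list and hand-rolls the maximum) by a single row-major pass maintaining a vector
-- of column totals, then max(); same value, O(n) instead of O(m*n) extra space.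

-- ===== PORT A =====
def norm_1 (a : List (List Int)) : Int :=
  let arr := (PySem.List.pyRange 0 (PySem.List.len (PySem.List.pyGetD a 0 []))).foldl
    (fun arr j =>
      ((PySem.List.pyRange 0 (PySem.List.len a)).foldl
        (fun (p : Int × List Int) i =>
          let s := p.1 + |PySem.List.pyGetD (PySem.List.pyGetD a i []) j 0|
          (s, p.2 ++ [s])) ((0 : Int), arr)).2) []
  let m0 := PySem.List.pyGetD arr 0 0
  arr.foldl (fun m item => if item > m then item else m) m0

-- ===== PORT B =====
def norm_1_alt (a : List (List Int)) : Int :=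
  let totals0 := PySem.List.pyRepeat [(0 : Int)] (PySem.List.len (PySem.List.pyGetD a 0 []))
  let totals := a.foldl (fun t row => List.zipWith (fun t x => t + |x|) t row) totals0
  match PySem.List.max? totals (fun y => y) with
  | some m => m
  | none => 0

-- ===== PRECONDITION & SPEC =====
-- Pre_ is exactly where Python A returns: a nonempty, the first row nonempty (else
-- IndexError on a[0][...] / arrayOfSum...[0]), and every row at least as long as the
-- first (else IndexError a[i][j]).
def Pre_norm_1 (a : List (List Int)) : Prop :=
  a ≠ [] ∧ a.headI ≠ [] ∧ ∀ row ∈ a, a.headI.length ≤ row.length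
instance (a : List (List Int)) : Decidable (Pre_norm_1 a) := by unfold Pre_norm_1; infer_instance

def pvWitness_norm_1 : List (List Int) := [[1, -2], [3, 4]]

def Spec_norm_1 (a : List (List Int)) (out : Int) : Prop := out = norm_1_alt a
instance (a : List (List Int)) (out : Int) : Decidable (Spec_norm_1 a out) := by unfold Spec_norm_1; infer_instance

-- ===== CLAIM (what is proved, stated in full; the proofs are below) =====
def Claim_equal_norm_1 : Prop := ∀ (a : List (List Int)), Dom_norm_1 a → Pre_norm_1 a → Spec_norm_1 a (norm_1 a)

-- ===== LEMMAS AND PROOFS =====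

-- absolute-value sum of column j, Int index (A-side) and Nat index (B-side)
def pvColsum (a : List (List Int)) (j : Int) : Int :=
  (a.map (fun row => |PySem.List.pyGetD row j 0|)).sum
def pvColsumN (a : List (List Int)) (j : Nat) : Int :=
  (a.map (fun row => |row.getD j 0|)).sum

theorem pvColsum_natCast (a : List (List Int)) (j : Nat) :
    pvColsum a (j : Int) = pvColsumN a j := by
  simp [pvColsum, pvColsumN, PySem.List.pyGetD_natCast]

-- the running prefix sums of column j that A appends, starting from s
def pvPref (a : List (List Int)) (j s : Int) : List Int :=
  match a with
  | [] => []
  | r :: rs => (s + |PySem.List.pyGetD r j 0|) :: pvPref rs j (s + |PySem.List.pyGetD r j 0|)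

theorem pvColsum_nonneg (a : List (List Int)) (j : Int) : 0 ≤ pvColsum a j := by
  unfold pvColsum
  apply List.sum_nonneg
  intro x hx
  simp only [List.mem_map] at hx
  obtain ⟨r, _, rfl⟩ := hx
  exact abs_nonneg _

theorem pvInner (a : List (List Int)) (j : Int) :
    ∀ (s : Int) (arr : List Int),
      a.foldl (fun (p : Int × List Int) row =>
          let s := p.1 + |PySem.List.pyGetD row j 0|
          (s, p.2 ++ [s])) (s, arr)
        = (s + pvColsum a j, arr ++ pvPref a j s) := by
  induction a with
  | nil => intro s arr; simp [pvColsum, pvPref]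
  | cons r rs ih =>
    intro s arr
    simp only [List.foldl_cons, ih, pvColsum, pvPref, List.map_cons, List.sum_cons]
    rw [Prod.mk.injEq]
    exact ⟨by ring, by simp⟩

theorem pvFoldlIfMax (xs : List Int) : ∀ m : Int,
    xs.foldl (fun m item => if item > m then item else m) m = xs.foldl max m := by
  induction xs with
  | nil => intro m; rfl
  | cons x t ih =>
    intro m
    simp only [List.foldl_cons, ih]
    congr 1
    rcases lt_or_ge m x with h | h
    · simp [h, max_eq_right h.le]
    · simp [not_lt.2 h, max_eq_left h]

theorem pvPrefMax (j : Int) : ∀ (a : List (List Int)), a ≠ [] → ∀ (s m : Int),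
    (pvPref a j s).foldl max m = max m (s + pvColsum a j) := by
  intro a
  induction a with
  | nil => intro h; exact absurd rfl h
  | cons r rs ih =>
    intro _ s m
    rcases eq_or_ne rs [] with rfl | hrs
    · simp [pvPref, pvColsum]
    · simp only [pvPref, List.foldl_cons, ih hrs]
      have h0 : 0 ≤ pvColsum rs j := pvColsum_nonneg rs j
      have : pvColsum (r :: rs) j = |PySem.List.pyGetD r j 0| + pvColsum rs j := by
        simp [pvColsum]
      rw [this]
      omega

theorem pvOuter (a : List (List Int)) : ∀ (js : List Int) (arr0 : List Int),
    js.foldl (fun arr j => arr ++ pvPref a j 0) arr0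
      = arr0 ++ js.flatMap (fun j => pvPref a j 0) := by
  intro js
  induction js with
  | nil => intro arr0; simp
  | cons j t ih => intro arr0; simp [List.foldl_cons, ih]

theorem pvFlatMax (a : List (List Int)) (ha : a ≠ []) : ∀ (js : List Int) (m : Int),
    (js.flatMap (fun j => pvPref a j 0)).foldl max m
      = js.foldl (fun m j => max m (pvColsum a j)) m := by
  intro js
  induction js with
  | nil => intro m; rfl
  | cons j t ih =>
    intro m
    simp only [List.flatMap_cons, List.foldl_append, List.foldl_cons, ih,
      pvPrefMax j a ha, zero_add]

theorem pvRepGetD (n j : Nat) : (List.replicate n (0 : Int)).getD j 0 = 0 := by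
  rcases lt_or_ge j n with h | h
  · rw [List.getD_eq_getElem _ _ (by simpa using h)]; simp
  · rw [List.getD_eq_default _ _ (by simpa using h)]

-- B's row-major fold yields exactly the per-column absolute-value totals
theorem pvFoldTotals : ∀ (a : List (List Int)) (t0 : List Int),
    (∀ row ∈ a, t0.length ≤ row.length) →
    a.foldl (fun t row => List.zipWith (fun t x => t + |x|) t row) t0
      = (List.range t0.length).map (fun j => t0.getD j 0 + pvColsumN a j) := by
  intro a
  induction a with
  | nil =>
    intro t0 _
    apply List.ext_getElem
    · simp
    · intro i h1 h2
      simp only [List.length_map, List.length_range] at h2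
      simp [pvColsumN, h2]
  | cons r rs ih =>
    intro t0 h
    have hr : t0.length ≤ r.length := h r (by simp)
    have hlen1 : (List.zipWith (fun t x => t + |x|) t0 r).length = t0.length := by
      simp [List.length_zipWith]; omega
    rw [List.foldl_cons, ih _ (by intro row hrow; rw [hlen1]; exact h row (by simp [hrow])),
      hlen1]
    apply List.map_congr_left
    intro j hj
    simp only [List.mem_range] at hj
    have hjr : j < r.length := lt_of_lt_of_le hj hr
    have h1 : (List.zipWith (fun t x => t + |x|) t0 r).getD j 0 = t0[j] + |r[j]| := by
      rw [List.getD_eq_getElem _ _ (by omega), List.getElem_zipWith]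
    have h2 : pvColsumN (r :: rs) j = |r.getD j 0| + pvColsumN rs j := by
      simp [pvColsumN]
    rw [h1, h2, List.getD_eq_getElem t0 _ hj, List.getD_eq_getElem r _ hjr]
    ring

-- ===== VERDICT (by name: the statement is the Claim_ definition above) =====
theorem norm_1_spec : Claim_equal_norm_1 := by
  intro a _ hpre
  obtain ⟨ha, hr, hrows⟩ := hpre
  obtain ⟨r, rs, rfl⟩ := List.exists_cons_of_ne_nil ha
  simp only [List.headI] at hr hrows
  unfold Spec_norm_1 norm_1 norm_1_alt
  have hget0 : PySem.List.pyGetD (r :: rs) 0 ([] : List Int) = r := by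
    simp [PySem.List.pyGetD, PySem.List.pyGet?, PySem.List.pyIdx?]
  rw [hget0]
  have hlen : PySem.List.len r = (r.length : Int) := by simp [PySem.List.len]
  have hpos : (0 : Int) < (r.length : Int) := by
    have : r.length ≠ 0 := by simpa [List.length_eq_zero_iff] using hr
    omega
  rw [hlen, PySem.List.pyRange_one_cons hpos]
  -- rewrite A's inner index loop to a row fold, then to pvPref/pvColsum
  have hinner : ∀ (j : Int) (arr : List Int),
      ((PySem.List.pyRange 0 (PySem.List.len (r :: rs))).foldl
        (fun (p : Int × List Int) i =>
          let s := p.1 + |PySem.List.pyGetD (PySem.List.pyGetD (r :: rs) i []) j 0|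
          (s, p.2 ++ [s])) ((0 : Int), arr)).2
        = arr ++ pvPref (r :: rs) j 0 := by
    intro j arr
    rw [PySem.List.foldl_pyRange_zero_pyGetD (r :: rs) []
      (fun (p : Int × List Int) row =>
          let s := p.1 + |PySem.List.pyGetD row j 0|
          (s, p.2 ++ [s])) ((0 : Int), arr)]
    rw [pvInner (r :: rs) j 0 arr]
  have hF : (fun (arr : List Int) (j : Int) =>
      ((PySem.List.pyRange 0 (PySem.List.len (r :: rs))).foldl
        (fun (p : Int × List Int) i =>
          let s := p.1 + |PySem.List.pyGetD (PySem.List.pyGetD (r :: rs) i []) j 0|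
          (s, p.2 ++ [s])) ((0 : Int), arr)).2)
      = fun (arr : List Int) (j : Int) => arr ++ pvPref (r :: rs) j 0 :=
    funext fun arr => funext fun j => hinner j arr
  rw [hF, pvOuter, List.nil_append]
  simp only [zero_add]
  -- A's seed m0 is the head of the flattened prefix list
  have hhead : ∀ (t : List Int) (x : Int), PySem.List.pyGetD (x :: t) 0 0 = x := by
    intro t x; simp [PySem.List.pyGetD, PySem.List.pyGet?, PySem.List.pyIdx?]
  have hflat : ((0 : Int) :: PySem.List.pyRange 1 (r.length : Int)).flatMap
      (fun j => pvPref (r :: rs) j 0)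
      = |PySem.List.pyGetD r 0 0| ::
        (pvPref rs 0 (|PySem.List.pyGetD r 0 0|) ++
          (PySem.List.pyRange 1 (r.length : Int)).flatMap (fun j => pvPref (r :: rs) j 0)) := by
    simp [pvPref]
  rw [hflat, hhead]
  rw [← hflat, pvFoldlIfMax, pvFlatMax (r :: rs) (by simp), List.foldl_cons]
  -- the seed is dominated by the first column sum
  have hseed : max (|PySem.List.pyGetD r 0 0|) (pvColsum (r :: rs) 0) = pvColsum (r :: rs) 0 := by
    have h0 : 0 ≤ pvColsum rs 0 := pvColsum_nonneg rs 0
    have : pvColsum (r :: rs) 0 = |PySem.List.pyGetD r 0 0| + pvColsum rs 0 := by simp [pvColsum]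
    omega
  rw [hseed]
  -- B's side: replicate seed, totals = column sums
  have hrep : PySem.List.pyRepeat [(0 : Int)] (r.length : Int) = List.replicate r.length 0 := by
    rw [PySem.List.pyRepeat_singleton]; simp
  rw [hrep]
  rw [pvFoldTotals (r :: rs) (List.replicate r.length 0)
    (by intro row hrow; rw [List.length_replicate]; exact hrows row hrow)]
  simp only [List.length_replicate, pvRepGetD, zero_add]
  -- split off j = 0 and align the two maxima
  obtain ⟨k, hk⟩ : ∃ k, r.length = k + 1 := ⟨r.length - 1, by omega⟩
  have hcast : ((k + 1 : Nat) : Int) = (k : Int) + 1 := by push_cast; ring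
  rw [hk, hcast, List.range_succ_eq_map, List.map_cons, PySem.List.max?_id_cons]
  have hrange : PySem.List.pyRange 1 ((k : Int) + 1) 1
      = (List.range k).map (fun j : Nat => (1 : Int) + j) := by
    rw [PySem.List.pyRange_one]
    have : ((k : Int) + 1 - 1).toNat = k := by omega
    rw [this]
  rw [hrange, List.foldl_map, List.map_map, List.foldl_map]
  have h0 : pvColsum (r :: rs) 0 = pvColsumN (r :: rs) 0 := by
    simpa using pvColsum_natCast (r :: rs) 0
  have hL : (List.range k).foldl
      (fun (m : Int) (j : Nat) => max m (pvColsum (r :: rs) (1 + (j : Int))))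
      (pvColsum (r :: rs) 0)
      = (List.range k).foldl
      (fun (m : Int) (j : Nat) => max m (pvColsumN (r :: rs) (Nat.succ j)))
      (pvColsumN (r :: rs) 0) := by
    rw [h0]
    apply PySem.List.foldl_congr_mem
    intro m j _
    have h1 : (1 + (j : Int)) = ((Nat.succ j : Nat) : Int) := by push_cast; ring
    rw [h1, pvColsum_natCast]
  exact hL
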